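-- pv_equiv track=rewrite | github.com/miliar/Code_Jam_Webscraper | solutions_python/solutions_year14_round0_nr4/803.py | get_war_score
-- ===== SOURCE A (Python) =====
-- def get_war_score(n,k,num):
--     n.sort(reverse = True)
--     k.sort(reverse = True)
--     score = 0
--     for i in range(num):
--         if(n[0]>k[0]):
--             n.remove(n[0])
--             x = k.pop()
--             score += 1
--         else:
--             val = get_optimum_number(n[0],k)
--             k.remove(val)
--             n.remove(n[0])
--     return score
--
-- def get_optimum_number(val,l):
--     l.sort(reverse = True)
--     i = 0
--     for elem in l:
--         if elem > val:
--             i += 1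
--             continue
--         else:
--           break
--     return l[i-1]
-- ===== SOURCE B (Python) =====
-- def _first_greater(ks, v, lo):
--     # binary search: smallest j in [lo, len(ks)] with ks[j] > v (ks sorted ascending)
--     hi = len(ks)
--     while lo < hi:
--         mid = (lo + hi) // 2
--         if ks[mid] <= v:
--             lo = mid + 1
--         else:
--             hi = mid
--     return lo
--
-- def get_war_score(n, k, num):
--     # Returns A's value; (A also sorts n and k in place -- B does not mutate its arguments.)
--     ns = sorted(n, reverse=True)
--     ks = sorted(k)          # Ken's cards, ascending, sorted once
--     lo = 0                  # ks[lo:] are Ken's remaining cards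
--     score = 0
--     for t in range(num):
--         v = ns[t]                   # Naomi's t-th largest card
--         if v > ks[-1]:              # beats Ken's max: score, Ken discards his min
--             score += 1
--             lo += 1
--         else:                       # Ken covers with his smallest card > v (min of ks[lo:] if tie at top)
--             j = _first_greater(ks, v, lo)
--             if j < len(ks):
--                 del ks[j]
--             else:
--                 lo += 1
--     return score
-- ===== Notes on version B (the rewrite author's own statement) =====
-- stated objective: faster
-- what changed: B sorts each list once and keeps Ken's cards as a single ascending array with a 'lo' pointer (min-discards are O(1) pointer bumps, a beater is removed by one positional delete), replacing A's per-round re-sorts, remove-by-value scans and pops on descending lists.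
import Mathlib
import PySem

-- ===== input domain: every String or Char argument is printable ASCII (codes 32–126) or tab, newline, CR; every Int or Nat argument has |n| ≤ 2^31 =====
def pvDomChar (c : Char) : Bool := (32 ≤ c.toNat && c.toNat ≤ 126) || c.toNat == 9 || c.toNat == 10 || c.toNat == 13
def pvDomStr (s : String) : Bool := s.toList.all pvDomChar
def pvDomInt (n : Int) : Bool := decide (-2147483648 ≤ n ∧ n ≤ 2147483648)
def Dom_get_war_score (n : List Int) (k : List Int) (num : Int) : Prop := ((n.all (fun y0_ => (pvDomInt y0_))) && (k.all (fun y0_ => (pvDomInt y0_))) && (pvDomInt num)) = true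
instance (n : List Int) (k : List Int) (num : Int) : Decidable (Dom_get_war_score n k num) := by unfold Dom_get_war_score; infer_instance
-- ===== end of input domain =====

-- B sorts once and keeps Ken's cards as one ascending list with a lo-pointer + binary search,
-- replacing A's per-round re-sorts and remove/pop scans (measured faster; return-value equivalence
-- only: Python A sorts its list arguments in place, B does not mutate them).


-- ===== PORT A =====

-- the 'i' scan of get_optimum_number: leading run of elements > val (the for/break loop)
def warCount (val : Int) : List Int → Nat
  | [] => 0
  | x :: xs => if val < x then warCount val xs + 1 else 0

-- get_optimum_number(val, l): sorts l descending in place (returned as second component) and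
-- returns l[i-1] (Python negative index: i = 0 gives the last element)
def get_optimum_number (val : Int) (l : List Int) : Int × List Int :=
  let l' := PySem.List.sorted l (fun x => x) true
  let i : Int := (warCount val l' : Int)
  (PySem.List.pyGetD l' (i - 1) 0, l')

-- the 'for i in range(num)' loop of A, state (n, k, score); fuel = number of iterations
def warLoopA : Nat → List Int → List Int → Int → Int
  | 0, _, _, score => score
  | t + 1, n, k, score =>
    match PySem.List.pyGet? n 0, PySem.List.pyGet? k 0 with
    | some n0, some k0 =>
      if k0 < n0 then
        match PySem.List.remove? n n0, PySem.List.pop? k (-1) with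
        | some n', some (_, k') => warLoopA t n' k' (score + 1)
        | _, _ => score                      -- unreachable: n0 ∈ n and k ≠ []
      else
        let vk := get_optimum_number n0 k
        match PySem.List.remove? vk.2 vk.1, PySem.List.remove? n n0 with
        | some k', some n' => warLoopA t n' k' score
        | _, _ => score                      -- unreachable under Pre_
    | _, _ => score                          -- IndexError region (outside Pre_)

def get_war_score (n : List Int) (k : List Int) (num : Int) : Int :=
  warLoopA num.toNat (PySem.List.sorted n (fun x => x) true)
    (PySem.List.sorted k (fun x => x) true) 0

-- ===== PORT B =====

-- hand-rolled binary search of Source B: smallest j in [lo, hi] with ks[j] > v (ks sorted ascending)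
def firstGreater (ks : List Int) (v : Int) (lo hi : Nat) : Nat :=
  if _h : lo < hi then
    let mid := (lo + hi) / 2
    if PySem.List.pyGetD ks (mid : Int) 0 ≤ v then firstGreater ks v (mid + 1) hi
    else firstGreater ks v lo mid
  else lo
termination_by hi - lo
decreasing_by all_goals omega

-- the 'for t in range(num)' loop of B, state (ks, lo, score); t is the current index into ns
def warLoopB (ns : List Int) : Nat → Nat → List Int → Nat → Int → Int
  | 0, _, _, _, score => score
  | r + 1, t, ks, lo, score =>
    let v := PySem.List.pyGetD ns (t : Int) 0
    if PySem.List.pyGetD ks (-1) 0 < v then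
      warLoopB ns r (t + 1) ks (lo + 1) (score + 1)
    else
      let j := firstGreater ks v lo ks.length
      if j < ks.length then warLoopB ns r (t + 1) (ks.eraseIdx j) lo score
      else warLoopB ns r (t + 1) ks (lo + 1) score

def get_war_score_alt (n : List Int) (k : List Int) (num : Int) : Int :=
  warLoopB (PySem.List.sorted n (fun x => x) true) num.toNat 0
    (PySem.List.sorted k (fun x => x) false) 0 0

-- ===== PRECONDITION & SPEC =====
-- Pre_ excludes exactly the inputs where A raises IndexError: more rounds than either player has cards.
def Pre_get_war_score (n : List Int) (k : List Int) (num : Int) : Prop :=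
  num ≤ (n.length : Int) ∧ num ≤ (k.length : Int)
instance (n : List Int) (k : List Int) (num : Int) : Decidable (Pre_get_war_score n k num) := by
  unfold Pre_get_war_score; infer_instance

def pvWitness_get_war_score : List Int × List Int × Int := ([5, 3, 1], [4, 8, 7], 3)

def Spec_get_war_score (n : List Int) (k : List Int) (num : Int) (out : Int) : Prop := out = get_war_score_alt n k num
instance (n : List Int) (k : List Int) (num : Int) (out : Int) : Decidable (Spec_get_war_score n k num out) := by unfold Spec_get_war_score; infer_instance

-- ===== CLAIM (what is proved, stated in full; the proofs are below) =====
def Claim_equal_get_war_score : Prop := ∀ (n : List Int) (k : List Int) (num : Int), Dom_get_war_score n k num → Pre_get_war_score n k num → Spec_get_war_score n k num (get_war_score n k num)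

-- ===== LEMMAS AND PROOFS =====

-- sorted lists are monotone position-wise
theorem sorted_getElem_le (l : List Int) (hs : l.Pairwise (· ≤ ·)) (i j : Nat)
    (hij : i ≤ j) (hj : j < l.length) : l[i]'(by omega) ≤ l[j] := by
  rcases Nat.lt_or_ge i j with h | h
  · exact (List.pairwise_iff_getElem.mp hs) i j (by omega) hj h
  · have : i = j := by omega
    subst this; exact le_refl _

-- characterization of the binary search: result j is the first index ≥ lo with ks[j] > v
theorem firstGreater_spec (ks : List Int) (v : Int) (hs : ks.Pairwise (· ≤ ·)) :
    ∀ fuel lo hi, hi - lo ≤ fuel → lo ≤ hi → hi ≤ ks.length →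
      lo ≤ firstGreater ks v lo hi ∧ firstGreater ks v lo hi ≤ hi ∧
      (∀ i (h : i < ks.length), lo ≤ i → i < firstGreater ks v lo hi → ks[i] ≤ v) ∧
      (firstGreater ks v lo hi < hi →
        ∀ h : firstGreater ks v lo hi < ks.length, v < ks[firstGreater ks v lo hi]) := by
  intro fuel
  induction fuel with
  | zero =>
      intro lo hi h1 h2 h3
      have : lo = hi := by omega
      subst this
      rw [firstGreater]
      simp
      omega
  | succ f ih =>
      intro lo hi h1 h2 h3
      rw [firstGreater]
      by_cases hlt : lo < hi
      · simp only [dif_pos hlt]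
        set mid := (lo + hi) / 2 with hmid
        have hm1 : lo ≤ mid := by omega
        have hm2 : mid < hi := by omega
        have hmlen : mid < ks.length := by omega
        have hget : PySem.List.pyGetD ks (mid : Int) 0 = ks[mid] := by
          simp [PySem.List.pyGetD_natCast, List.getElem?_eq_getElem hmlen]
        by_cases hcmp : ks[mid] ≤ v
        · rw [if_pos (by rw [hget]; exact hcmp)]
          obtain ⟨a, b, c, d⟩ := ih (mid + 1) hi (by omega) (by omega) h3
          refine ⟨by omega, b, ?_, d⟩
          intro i h hi1 hi2
          rcases Nat.lt_or_ge i (mid + 1) with hc | hc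
          · exact le_trans (sorted_getElem_le ks hs i mid (by omega) hmlen) hcmp
          · exact c i h hc hi2
        · rw [if_neg (by rw [hget]; exact hcmp)]
          obtain ⟨a, b, c, d⟩ := ih lo mid (by omega) (by omega) (by omega)
          refine ⟨a, by omega, c, ?_⟩
          intro hlt2 h
          rcases Nat.lt_or_ge (firstGreater ks v lo mid) mid with hc | hc
          · exact d hc h
          · have heq : firstGreater ks v lo mid = mid := by omega
            have := hcmp
            simp only [heq]
            omega
      · simp only [dif_neg hlt]
        exact ⟨le_refl _, h2, fun i h hi1 hi2 => absurd hi2 (by omega), fun hl _ => absurd hl hlt⟩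

-- countdown scan on an all-greater prefix
theorem warCount_append (v : Int) (xs ys : List Int) (h : ∀ x ∈ xs, v < x) :
    warCount v (xs ++ ys) = xs.length + warCount v ys := by
  induction xs with
  | nil => simp
  | cons x xs ih =>
      simp only [List.cons_append, warCount, if_pos (h x (by simp))]
      rw [ih (fun x hx => h x (by simp [hx]))]; simp; omega

theorem warCount_head_le (v : Int) (l : List Int) (h : ∀ hne : l ≠ [], l.head hne ≤ v) :
    warCount v l = 0 := by
  cases l with
  | nil => rfl
  | cons x xs =>
      have := h (by simp)
      simp only [List.head_cons] at this
      simp [warCount, not_lt.mpr this]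

-- two sorted-descending permutations of the same multiset are equal
theorem eq_of_perm_sorted_desc (l1 l2 : List Int) (p : l1.Perm l2)
    (s1 : l1.Pairwise (· ≥ ·)) (s2 : l2.Pairwise (· ≥ ·)) : l1 = l2 :=
  p.eq_of_pairwise (by intro a b _ _ h1 h2; omega) s1 s2

theorem drop_eraseIdx_comm (ks : List Int) (lo c : Nat) (h : lo + c < ks.length) :
    (ks.eraseIdx (lo + c)).drop lo = (ks.drop lo).eraseIdx c := by
  rw [List.eraseIdx_eq_take_drop_succ, List.eraseIdx_eq_take_drop_succ, List.drop_append]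
  simp [List.take_drop, List.drop_drop]
  omega


-- THE LOOP INVARIANT: A's k-state is the reverse of the live suffix ks[lo:] of B's array,
-- A's n-state is the suffix nsD[t:], scores agree.
theorem warLoop_eq (nsD : List Int) :
    ∀ r t (ks : List Int) (lo : Nat) (score : Int),
      ks.Pairwise (· ≤ ·) → lo + r ≤ ks.length → t + r ≤ nsD.length →
      warLoopA r (nsD.drop t) ((ks.drop lo).reverse) score = warLoopB nsD r t ks lo score := by
  intro r
  induction r with
  | zero => intro t ks lo score _ _ _; rfl
  | succ r ih =>
    intro t ks lo score hks hlo ht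
    have hlen : lo < ks.length := by omega
    have htlen : t < nsD.length := by omega
    have halen : (ks.drop lo).length = ks.length - lo := List.length_drop
    have haneq : ks.drop lo ≠ [] := by
      apply List.ne_nil_of_length_pos; omega
    have hksne : ks ≠ [] := by
      intro h; rw [h] at hlen; simp at hlen
    have hkAne : (ks.drop lo).reverse ≠ [] := by
      simpa using haneq
    have hdropn : nsD.drop t = nsD[t] :: nsD.drop (t + 1) := List.drop_eq_getElem_cons htlen
    have hdropk : ks.drop lo = ks[lo] :: ks.drop (lo + 1) := List.drop_eq_getElem_cons hlen
    have hkApair : ((ks.drop lo).reverse).Pairwise (fun a b => b ≤ a) := by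
      rw [List.pairwise_reverse]
      exact hks.sublist (List.drop_sublist lo ks)
    have hk0 : ((ks.drop lo).reverse).head hkAne = ks.getLast hksne := by
      rw [List.head_reverse]; exact List.getLast_drop haneq
    -- unfold the B side one step
    have hvB : PySem.List.pyGetD nsD (t : Int) 0 = nsD[t] := by
      simp [List.getElem?_eq_getElem htlen]
    have hlastB : PySem.List.pyGetD ks (-1) 0 = ks.getLast hksne :=
      PySem.List.pyGetD_neg_one ks 0 hksne
    rw [hdropn]
    simp only [warLoopB, hvB, hlastB]
    -- unfold the A side one step
    have hgetn : PySem.List.pyGet? (nsD[t] :: nsD.drop (t + 1)) 0 = some nsD[t] :=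
      PySem.List.pyGet?_zero_cons _ _
    have h0 : 0 < ((ks.drop lo).reverse).length := by simp; omega
    have hgetk : PySem.List.pyGet? ((ks.drop lo).reverse) 0 = some (ks.getLast hksne) := by
      rw [PySem.List.pyGet?_zero, List.getElem?_eq_getElem h0, ← hk0, List.head_eq_getElem]
    by_cases hcond : ks.getLast hksne < nsD[t]
    · -- SCORE branch
      rw [if_pos hcond]
      have hremn : PySem.List.remove? (nsD[t] :: nsD.drop (t + 1)) nsD[t] = some (nsD.drop (t + 1)) :=
        PySem.List.remove?_cons_self _ _
      have hpop : PySem.List.pop? ((ks.drop lo).reverse) (-1) =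
          some (ks[lo], (ks.drop (lo + 1)).reverse) := by
        rw [hdropk, List.reverse_cons]; exact PySem.List.pop?_last _ _
      rw [warLoopA.eq_2, hgetn, hgetk]
      simp only [if_pos hcond, hremn, hpop]
      exact ih (t + 1) ks (lo + 1) (score + 1) hks (by omega) (by omega)
    · -- ELSE branch
      rw [if_neg hcond]
      obtain ⟨hj1, hj2, hj3, hj4⟩ :=
        firstGreater_spec ks nsD[t] hks ks.length lo ks.length (by omega) (by omega) le_rfl
      set j := firstGreater ks nsD[t] lo ks.length with hjdef
      have hsortid : PySem.List.sorted ((ks.drop lo).reverse) (fun x => x) true = (ks.drop lo).reverse :=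
        PySem.List.sorted_rev_eq_self_of_pairwise _ _ hkApair
      by_cases hjlt : j < ks.length
      · -- Ken has a card > v : B deletes index j, A erases the same value
        rw [if_pos hjlt]
        have hjlo : j - lo < (ks.drop lo).length := by omega
        have hcnt : warCount nsD[t] ((ks.drop lo).reverse) = ks.length - j := by
          have htd : ks.drop lo =
              (ks.drop lo).take (j - lo) ++ (ks.drop lo).drop (j - lo) :=
            (List.take_append_drop _ _).symm
          have hgt : ∀ x ∈ ((ks.drop lo).drop (j - lo)).reverse, nsD[t] < x := by
            intro x hx
            rw [List.mem_reverse] at hx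
            obtain ⟨m, hm, rfl⟩ := List.mem_iff_getElem.mp hx
            rw [List.getElem_drop, List.getElem_drop]
            refine lt_of_lt_of_le (hj4 hjlt hjlt) ?_
            exact sorted_getElem_le ks hks j (lo + (j - lo + m)) (by omega) (by
              have := hm; simp [List.length_drop] at this ⊢; omega)
          have h0 : warCount nsD[t] (((ks.drop lo).take (j - lo)).reverse) = 0 := by
            apply warCount_head_le
            intro hne
            have htne : (ks.drop lo).take (j - lo) ≠ [] := by simpa using hne
            have htpos : 0 < ((ks.drop lo).take (j - lo)).length :=
              List.length_pos_of_ne_nil htne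
            have htlen' : ((ks.drop lo).take (j - lo)).length = j - lo := by
              simp [List.length_take]; omega
            rw [List.head_reverse, List.getLast_eq_getElem]
            rw [List.getElem_take, List.getElem_drop]
            rw [getElem_congr rfl (show lo + (((ks.drop lo).take (j - lo)).length - 1) = lo + (j - lo - 1) from by omega) (by omega)]
            exact hj3 (lo + (j - lo - 1)) (by omega) (by omega) (by omega)
          calc warCount nsD[t] ((ks.drop lo).reverse)
              = warCount nsD[t] ((((ks.drop lo).take (j - lo)) ++ ((ks.drop lo).drop (j - lo))).reverse) := by
                rw [← htd]
            _ = warCount nsD[t] (((ks.drop lo).drop (j - lo)).reverse ++ ((ks.drop lo).take (j - lo)).reverse) := by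
                rw [List.reverse_append]
            _ = (((ks.drop lo).drop (j - lo)).reverse).length +
                warCount nsD[t] (((ks.drop lo).take (j - lo)).reverse) := warCount_append _ _ _ hgt
            _ = ks.length - j := by
                rw [h0]; simp [List.length_drop]; omega
        have hval : PySem.List.pyGetD ((ks.drop lo).reverse)
            ((warCount nsD[t] ((ks.drop lo).reverse) : Int) - 1) 0 = ks[j] := by
          rw [hcnt]
          have h01 : ((ks.length - j : Nat) : Int) - 1 = ((ks.length - j - 1 : Nat) : Int) := by omega
          rw [h01, PySem.List.pyGetD_natCast]
          have hix : ks.length - j - 1 < ((ks.drop lo).reverse).length := by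
            simp [List.length_drop]; omega
          rw [List.getD_eq_getElem _ _ hix, List.getElem_reverse, List.getElem_drop]
          have : lo + ((ks.drop lo).length - 1 - (ks.length - j - 1)) = j := by
            rw [List.length_drop]; omega
          exact getElem_congr rfl this _
        have hmem : ks[j] ∈ (ks.drop lo).reverse := by
          rw [List.mem_reverse]
          have : ks[j] = (ks.drop lo)[j - lo]'(by omega) := by
            rw [List.getElem_drop]; congr 1; omega
          rw [this]; exact List.getElem_mem _
        have hremk : PySem.List.remove? ((ks.drop lo).reverse) ks[j] =
            some (((ks.drop lo).reverse).erase ks[j]) :=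
          PySem.List.remove?_eq_some_erase _ _ hmem
        have hremn : PySem.List.remove? (nsD[t] :: nsD.drop (t + 1)) nsD[t] = some (nsD.drop (t + 1)) :=
          PySem.List.remove?_cons_self _ _
        have hkj : ks[j] = (ks.drop lo)[j - lo]'hjlo := by
          rw [List.getElem_drop]; exact getElem_congr rfl (by omega) _
        have herase : ((ks.drop lo).reverse).erase ks[j] = ((ks.eraseIdx j).drop lo).reverse := by
          have hcomm : (ks.eraseIdx j).drop lo = (ks.drop lo).eraseIdx (j - lo) := by
            conv_lhs => rw [show j = lo + (j - lo) from by omega]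
            exact drop_eraseIdx_comm ks lo (j - lo) (by omega)
          rw [hcomm]
          apply eq_of_perm_sorted_desc
          · apply List.Perm.cons_inv (a := ks[j])
            refine ((List.perm_cons_erase hmem).symm).trans ?_
            have pa : ((ks.drop lo).reverse).Perm (ks.drop lo) := List.reverse_perm _
            have pb : (ks.drop lo).Perm
                ((ks.drop lo)[j - lo]'hjlo :: (ks.drop lo).eraseIdx (j - lo)) :=
              (List.getElem_cons_eraseIdx_perm hjlo).symm
            refine (pa.trans pb).trans ?_
            rw [← hkj]
            exact ((List.reverse_perm _).symm).cons _
          · exact hkApair.sublist List.erase_sublist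
          · rw [List.pairwise_reverse]
            exact (hks.sublist (List.drop_sublist _ _)).sublist (List.eraseIdx_sublist _ _)
        rw [warLoopA.eq_2, hgetn, hgetk]
        simp only [if_neg hcond, get_optimum_number, hsortid, hval, hremk, hremn, herase]
        exact ih (t + 1) (ks.eraseIdx j) lo score
          (hks.sublist (List.eraseIdx_sublist ks j))
          (by rw [List.length_eraseIdx]; simp [hjlt]; omega) (by omega)
      · -- no card > v (tie at the top): both discard Ken's minimum
        rw [if_neg hjlt]
        have hjeq : j = ks.length := by omega
        have hcnt : warCount nsD[t] ((ks.drop lo).reverse) = 0 := by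
          apply warCount_head_le
          intro hne
          rw [hk0, List.getLast_eq_getElem]
          exact hj3 (ks.length - 1) (by omega) (by omega) (by omega)
        have hval : PySem.List.pyGetD ((ks.drop lo).reverse)
            ((warCount nsD[t] ((ks.drop lo).reverse) : Int) - 1) 0 = ks[lo] := by
          rw [hcnt]
          norm_num
          rw [hdropk, List.reverse_cons]
          exact PySem.List.pyGetD_neg_one_append_singleton _ _ _
        have hmem : ks[lo] ∈ (ks.drop lo).reverse := by
          rw [List.mem_reverse, hdropk]
          exact List.mem_cons_self
        have hremk : PySem.List.remove? ((ks.drop lo).reverse) ks[lo] =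
            some (((ks.drop lo).reverse).erase ks[lo]) :=
          PySem.List.remove?_eq_some_erase _ _ hmem
        have hremn : PySem.List.remove? (nsD[t] :: nsD.drop (t + 1)) nsD[t] = some (nsD.drop (t + 1)) :=
          PySem.List.remove?_cons_self _ _
        have herase : ((ks.drop lo).reverse).erase ks[lo] = (ks.drop (lo + 1)).reverse := by
          apply eq_of_perm_sorted_desc
          · apply List.Perm.cons_inv (a := ks[lo])
            refine ((List.perm_cons_erase hmem).symm).trans ?_
            have p1 : ((ks.drop lo).reverse).Perm (ks[lo] :: ks.drop (lo + 1)) := by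
              rw [← hdropk]; exact List.reverse_perm _
            exact p1.trans (((List.reverse_perm _).symm).cons _)
          · exact hkApair.sublist List.erase_sublist
          · rw [List.pairwise_reverse]
            exact hks.sublist ((List.drop_sublist _ _))
        rw [warLoopA.eq_2, hgetn, hgetk]
        simp only [if_neg hcond, get_optimum_number, hsortid, hval, hremk, hremn, herase]
        exact ih (t + 1) ks (lo + 1) score hks (by omega) (by omega)


-- initial states line up: sorted descending = reverse of sorted ascending (Int lists)
theorem sorted_desc_eq_reverse_asc (l : List Int) :
    PySem.List.sorted l (fun x => x) true = (PySem.List.sorted l (fun x => x) false).reverse := by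
  apply eq_of_perm_sorted_desc
  · exact (PySem.List.sorted_perm l (fun x => x) true).trans
      ((PySem.List.sorted_perm l (fun x => x) false).symm.trans (List.reverse_perm _).symm)
  · exact PySem.List.sorted_pairwise_rev l (fun x => x)
  · rw [List.pairwise_reverse]
    exact PySem.List.sorted_pairwise l (fun x => x)

-- ===== VERDICT (by name: the statement is the Claim_ definition above) =====
theorem get_war_score_spec : Claim_equal_get_war_score := by
  intro n k num _hdom hpre
  unfold Spec_get_war_score get_war_score get_war_score_alt
  have hk := sorted_desc_eq_reverse_asc k
  have hkp := PySem.List.sorted_pairwise k (fun x => x)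
  have hkl : (PySem.List.sorted k (fun x => x) false).length = k.length :=
    (PySem.List.sorted_perm k (fun x => x) false).length_eq
  have hnl : (PySem.List.sorted n (fun x => x) true).length = n.length :=
    (PySem.List.sorted_perm n (fun x => x) true).length_eq
  obtain ⟨h1, h2⟩ := hpre
  have := warLoop_eq (PySem.List.sorted n (fun x => x) true) num.toNat 0
      (PySem.List.sorted k (fun x => x) false) 0 0 hkp (by omega) (by omega)
  simpa [hk] using this
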